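-- pv_equiv track=rewrite | github.com/tukanosoftwarehouse/typescript-example-project | scripts/LLMReview.py | extract_file_line_number
-- ===== SOURCE A (Python) =====
-- def extract_file_line_number(numbered_line: str, diff_text: str, file_path: str) -> tuple[int, bool]:
--     """Extract the actual file line number from diff for a given numbered line."""
--     try:
--         line_num = int(numbered_line)
--         lines = diff_text.split('\n')
--
--         if line_num > len(lines):
--             return 0, False
--
--         target_line = lines[line_num - 1]
--
--         # Check if it's a change line
--         is_change_line = target_line.startswith('+') or target_line.startswith('-')
--         if not is_change_line:
--             return 0, False
--
--         # Find the file section and track line numbers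
--         current_file = None
--         new_line_num = 0
--
--         for i in range(line_num):
--             line = lines[i]
--
--             # Track which file we're in
--             if line.startswith('+++ b/'):
--                 current_file = line[6:]  # Remove '+++ b/'
--
--             # Parse hunk header to get starting line number
--             elif line.startswith('@@'):
--                 # Format: @@ -old_start,old_count +new_start,new_count @@
--                 parts = line.split(' ')
--                 if len(parts) >= 3:
--                     new_part = parts[2]  # +new_start,new_count
--                     if new_part.startswith('+'):
--                         new_line_num = int(new_part[1:].split(',')[0]) - 1  # Start from line before
--
--             # Count lines in the new file (+ and context lines)
--             elif current_file == file_path and (line.startswith('+') or line.startswith(' ')):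
--                 new_line_num += 1
--
--                 # If this is our target line, return the line number
--                 if i == line_num - 1:
--                     return new_line_num, True
--
--         return 0, False
--     except (ValueError, IndexError):
--         return 0, False
-- ===== SOURCE B (Python) =====
-- def extract_file_line_number(numbered_line: str, diff_text: str, file_path: str) -> tuple[int, bool]:
--     """Extract the actual file line number from diff for a given numbered line."""
--     try:
--         line_num = int(numbered_line)
--     except ValueError:
--         return 0, False
--     lines = diff_text.split('\n')
--     if not (1 <= line_num <= len(lines)):
--         return 0, False
--     target = lines[line_num - 1]
--     if not (target.startswith('+') or target.startswith('-')):
--         return 0, False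
--     prefix = lines[:line_num - 1]
--     # Locate the last hunk header before the target and its new-file start;
--     # a hunk header with an unparsable start number makes the diff unusable.
--     start, base = 0, 0
--     for i, line in enumerate(prefix):
--         if line.startswith('@@'):
--             parts = line.split(' ')
--             if len(parts) >= 3 and parts[2].startswith('+'):
--                 try:
--                     base = int(parts[2][1:].split(',')[0]) - 1
--                 except ValueError:
--                     return 0, False
--                 start = i + 1
--     # File section in effect at that header: most recent '+++ b/' marker.
--     current = None
--     for line in reversed(prefix[:start]):
--         if line.startswith('+++ b/'):
--             current = line[6:]
--             break
--     # Count new-file lines from the header through the target; the answer is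
--     # valid only if the target itself was one of the counted lines.
--     count = base
--     counted = False
--     for line in lines[start:line_num]:
--         if line.startswith('+++ b/'):
--             current = line[6:]
--             counted = False
--         elif line.startswith('@@'):
--             counted = False
--         elif current == file_path and (line.startswith('+') or line.startswith(' ')):
--             count += 1
--             counted = True
--         else:
--             counted = False
--     return (count, True) if counted else (0, False)
-- ===== Notes on version B (the rewrite author's own statement) =====
-- stated objective: alternative
-- what changed: A's single accumulating forward pass over all lines before the target is replaced by three phases: a scan over hunk headers that keeps only the last one's position and new-file start, a backward scan for the '+++ b/' file marker in effect there, and one counting loop that runs only from that header through the target and reports whether the target itself was counted.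
import Mathlib
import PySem

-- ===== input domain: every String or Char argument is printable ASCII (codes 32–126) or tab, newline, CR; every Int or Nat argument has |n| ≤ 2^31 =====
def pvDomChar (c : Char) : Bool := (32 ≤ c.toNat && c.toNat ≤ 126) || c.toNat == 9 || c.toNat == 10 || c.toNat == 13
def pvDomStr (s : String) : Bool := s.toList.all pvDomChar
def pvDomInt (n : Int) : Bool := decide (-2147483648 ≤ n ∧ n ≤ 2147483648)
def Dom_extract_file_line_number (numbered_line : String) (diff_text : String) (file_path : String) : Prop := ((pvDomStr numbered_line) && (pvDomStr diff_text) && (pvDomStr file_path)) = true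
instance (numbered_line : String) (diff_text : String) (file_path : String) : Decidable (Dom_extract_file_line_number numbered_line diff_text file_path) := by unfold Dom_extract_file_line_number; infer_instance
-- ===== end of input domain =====

-- B replaces A's single accumulating forward pass by three phases (last hunk header,
-- backward scan for the file marker in effect there, one counting loop from the header
-- through the target); same return value everywhere.

-- ===== PORT A =====
-- `int(parts[2][1:].split(',')[0])` of the hunk header, shared spelling of the same Python expression
def pvHunkNum? (new_part : List Char) : Option Int :=
  PySem.Int.ofChars? ((PySem.Chars.splitOn (PySem.List.slice new_part (some 1) none) [',']).headD [])

-- A's `for i in range(line_num)` loop: early return inside the count branch,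
-- ValueError from int() = (0, false), fall-through = (0, false)
def pvLoopA (file_path : List Char) (last : Int) :
    List (List Char) → Int → Option (List Char) → Int → Int × Bool
  | [], _, _, _ => (0, false)
  | line :: rest, i, cf, nl =>
    if PySem.Chars.startswith line ['+','+','+',' ','b','/'] then
      pvLoopA file_path last rest (i + 1) (some (PySem.List.slice line (some 6) none)) nl
    else if PySem.Chars.startswith line ['@','@'] then
      let parts := PySem.Chars.splitOn line [' ']
      if 3 ≤ parts.length then
        let new_part := parts[2]?.getD []
        if PySem.Chars.startswith new_part ['+'] then
          match pvHunkNum? new_part with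
          | none => (0, false)            -- ValueError caught: return 0, False
          | some v => pvLoopA file_path last rest (i + 1) cf (v - 1)
        else pvLoopA file_path last rest (i + 1) cf nl
      else pvLoopA file_path last rest (i + 1) cf nl
    else if cf == some file_path &&
        (PySem.Chars.startswith line ['+'] || PySem.Chars.startswith line [' ']) then
      if i == last then (nl + 1, true)
      else pvLoopA file_path last rest (i + 1) cf (nl + 1)
    else pvLoopA file_path last rest (i + 1) cf nl

def extract_file_line_number (numbered_line : String) (diff_text : String) (file_path : String) : Int × Bool :=
  match PySem.Int.ofChars? numbered_line.toList with
  | none => (0, false)                    -- ValueError caught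
  | some line_num =>
    let lines := PySem.Chars.splitOn diff_text.toList ['\n']
    if line_num > (lines.length : Int) then (0, false)
    else
      match PySem.List.pyGet? lines (line_num - 1) with
      | none => (0, false)                -- IndexError caught
      | some target =>
        if PySem.Chars.startswith target ['+'] || PySem.Chars.startswith target ['-'] then
          pvLoopA file_path.toList (line_num - 1) (lines.take line_num.toNat) 0 none 0
        else (0, false)

-- ===== PORT B =====
-- phase 1: last hunk header before the target (index just past it, and its new-file
-- start minus one); none = a header's start number is unparsable
def pvPhase1 : List (List Char) → Nat → Nat × Int → Option (Nat × Int)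
  | [], _, sb => some sb
  | line :: rest, i, sb =>
    if PySem.Chars.startswith line ['@','@'] then
      let parts := PySem.Chars.splitOn line [' ']
      if 3 ≤ parts.length && PySem.Chars.startswith (parts[2]?.getD []) ['+'] then
        match pvHunkNum? (parts[2]?.getD []) with
        | none => none
        | some v => pvPhase1 rest (i + 1) (i + 1, v - 1)
      else pvPhase1 rest (i + 1) sb
    else pvPhase1 rest (i + 1) sb

-- phase 2: first '+++ b/' marker of the reversed prefix
def pvLastFile : List (List Char) → Option (List Char)
  | [] => none
  | line :: rest =>
    if PySem.Chars.startswith line ['+','+','+',' ','b','/'] then some (PySem.List.slice line (some 6) none)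
    else pvLastFile rest

-- phase 3: count new-file lines from the header through the target; the Bool records
-- whether the most recent line was counted
def pvPhase3 (fp : List Char) :
    List (List Char) → Option (List Char) × Int × Bool → Option (List Char) × Int × Bool
  | [], st => st
  | line :: rest, (cur, cnt, _) =>
    if PySem.Chars.startswith line ['+','+','+',' ','b','/'] then
      pvPhase3 fp rest (some (PySem.List.slice line (some 6) none), cnt, false)
    else if PySem.Chars.startswith line ['@','@'] then
      pvPhase3 fp rest (cur, cnt, false)
    else if cur == some fp &&
        (PySem.Chars.startswith line ['+'] || PySem.Chars.startswith line [' ']) then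
      pvPhase3 fp rest (cur, cnt + 1, true)
    else pvPhase3 fp rest (cur, cnt, false)

def extract_file_line_number_alt (numbered_line : String) (diff_text : String) (file_path : String) : Int × Bool :=
  match PySem.Int.ofChars? numbered_line.toList with
  | none => (0, false)
  | some line_num =>
    let lines := PySem.Chars.splitOn diff_text.toList ['\n']
    if 1 ≤ line_num ∧ line_num ≤ (lines.length : Int) then
      let k := (line_num - 1).toNat
      let target := lines.getD k []
      if PySem.Chars.startswith target ['+'] || PySem.Chars.startswith target ['-'] then
        match pvPhase1 (lines.take k) 0 (0, 0) with
        | none => (0, false)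
        | some (s, b) =>
          let st := pvPhase3 file_path.toList ((lines.take line_num.toNat).drop s)
            (pvLastFile ((lines.take k).take s).reverse, b, false)
          if st.2.2 then (st.2.1, true) else (0, false)
      else (0, false)
    else (0, false)

-- ===== PRECONDITION & SPEC =====
def Spec_extract_file_line_number (numbered_line : String) (diff_text : String) (file_path : String) (out : Int × Bool) : Prop := out = extract_file_line_number_alt numbered_line diff_text file_path
instance (numbered_line : String) (diff_text : String) (file_path : String) (out : Int × Bool) : Decidable (Spec_extract_file_line_number numbered_line diff_text file_path out) := by unfold Spec_extract_file_line_number; infer_instance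

-- ===== CLAIM (what is proved, stated in full; the proofs are below) =====
def Claim_equal_extract_file_line_number : Prop := ∀ (numbered_line : String) (diff_text : String) (file_path : String), Dom_extract_file_line_number numbered_line diff_text file_path → Spec_extract_file_line_number numbered_line diff_text file_path (extract_file_line_number numbered_line diff_text file_path)

-- ===== LEMMAS AND PROOFS =====

-- one step of A's loop without the early return; none = ValueError
def pvStepA (fp : List Char) (st : Option (List Char) × Int) (line : List Char) :
    Option (Option (List Char) × Int) :=
  if PySem.Chars.startswith line ['+','+','+',' ','b','/'] then
    some (some (PySem.List.slice line (some 6) none), st.2)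
  else if PySem.Chars.startswith line ['@','@'] then
    let parts := PySem.Chars.splitOn line [' ']
    if 3 ≤ parts.length then
      if PySem.Chars.startswith (parts[2]?.getD []) ['+'] then
        match pvHunkNum? (parts[2]?.getD []) with
        | none => none
        | some v => some (st.1, v - 1)
      else some st
    else some st
  else if st.1 == some fp &&
      (PySem.Chars.startswith line ['+'] || PySem.Chars.startswith line [' ']) then
    some (st.1, st.2 + 1)
  else some st

def pvRun (fp : List Char) : List (List Char) → Option (List Char) × Int → Option (Option (List Char) × Int)
  | [], st => some st
  | line :: rest, st =>
    match pvStepA fp st line with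
    | none => none
    | some st' => pvRun fp rest st'

-- proof-side counting pass without the 'counted' flag (phase 3's state projection)
def pvCount (fp : List Char) : List (List Char) → Option (List Char) × Int → Option (List Char) × Int
  | [], st => st
  | line :: rest, (cur, cnt) =>
    if PySem.Chars.startswith line ['+','+','+',' ','b','/'] then
      pvCount fp rest (some (PySem.List.slice line (some 6) none), cnt)
    else if !PySem.Chars.startswith line ['@','@'] && cur == some fp &&
        (PySem.Chars.startswith line ['+'] || PySem.Chars.startswith line [' ']) then
      pvCount fp rest (cur, cnt + 1)
    else pvCount fp rest (cur, cnt)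

theorem pvRun_append (fp : List Char) (xs ys : List (List Char)) (st : Option (List Char) × Int) :
    pvRun fp (xs ++ ys) st =
      match pvRun fp xs st with
      | none => none
      | some st' => pvRun fp ys st' := by
  induction xs generalizing st with
  | nil => simp [pvRun]
  | cons a l ih =>
    simp only [List.cons_append, pvRun]
    cases pvStepA fp st a with
    | none => rfl
    | some st2 => exact ih st2

-- one non-final step of A's loop is pvStepA
theorem pvLoopA_step (fp : List Char) (last : Int) (a : List Char) (rest : List (List Char))
    (i : Int) (cf : Option (List Char)) (nl : Int) (hi : (i == last) = false) :
    pvLoopA fp last (a :: rest) i cf nl =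
      match pvStepA fp (cf, nl) a with
      | none => (0, false)
      | some st => pvLoopA fp last rest (i + 1) st.1 st.2 := by
  by_cases h1 : PySem.Chars.startswith a ['+','+','+',' ','b','/'] = true
  · simp [pvLoopA, pvStepA, h1]
  · by_cases h2 : PySem.Chars.startswith a ['@','@'] = true
    · by_cases h3 : 3 ≤ (PySem.Chars.splitOn a [' ']).length
      · by_cases h4 : PySem.Chars.startswith ((PySem.Chars.splitOn a [' '])[2]?.getD [])
            ['+'] = true
        · cases hn : pvHunkNum? ((PySem.Chars.splitOn a [' '])[2]?.getD []) <;>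
            simp [pvLoopA, pvStepA, h1, h2, h3, h4, hn]
        · simp [pvLoopA, pvStepA, h1, h2, h3, h4]
      · simp [pvLoopA, pvStepA, h1, h2, h3]
    · by_cases h5 : (cf == some fp && (PySem.Chars.startswith a ['+'] ||
          PySem.Chars.startswith a [' '])) = true
      · simp [pvLoopA, pvStepA, h1, h2, h5, hi]
      · simp [pvLoopA, pvStepA, h1, h2, h5]

-- A's loop on P ++ [target] = run P without early return, then one last step on target
theorem pvLoopA_split (fp : List Char) (last : Int) (P : List (List Char)) (t : List Char) :
    ∀ (i : Int) (cf : Option (List Char)) (nl : Int), i + P.length = last →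
    pvLoopA fp last (P ++ [t]) i cf nl =
      match pvRun fp P (cf, nl) with
      | none => (0, false)
      | some st => pvLoopA fp last [t] last st.1 st.2 := by
  induction P with
  | nil =>
    intro i cf nl h
    simp only [List.length_nil, Int.natCast_zero, add_zero] at h
    subst h; simp [pvRun]
  | cons a l ih =>
    intro i cf nl h
    have hi' : (i == last) = false := by
      simp only [List.length_cons] at h
      have : (0:Int) ≤ (l.length : Int) := Int.natCast_nonneg _
      simp only [beq_eq_false_iff_ne, ne_eq]
      push_cast at h; omega
    have hrec : (i + 1) + (l.length : Int) = last := by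
      simp only [List.length_cons] at h; push_cast at h ⊢; omega
    rw [List.cons_append, pvLoopA_step fp last a (l ++ [t]) i cf nl hi']
    simp only [pvRun]
    cases pvStepA fp (cf, nl) a with
    | none => rfl
    | some st2 => exact ih _ _ _ hrec

theorem pvLastFile_append (xs ys : List (List Char)) :
    pvLastFile (xs ++ ys) = (pvLastFile xs).or (pvLastFile ys) := by
  induction xs with
  | nil => simp [pvLastFile]
  | cons a l ih =>
    simp only [List.cons_append, pvLastFile]
    split_ifs with h
    · simp
    · simpa using ih

-- pvStepA on a non-'+++ b/' line keeps the current file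
theorem pvStepA_fst (fp : List Char) (st : Option (List Char) × Int) (a : List Char)
    (st2 : Option (List Char) × Int)
    (h1 : PySem.Chars.startswith a ['+','+','+',' ','b','/'] = false)
    (h : pvStepA fp st a = some st2) : st2.1 = st.1 := by
  simp only [pvStepA, h1, Bool.false_eq_true, if_false] at h
  split_ifs at h
  all_goals try rw [← Option.some.inj h]
  cases hv : pvHunkNum? ((PySem.Chars.splitOn a [' '])[2]?.getD []) with
  | none => rw [hv] at h; exact absurd h (by simp)
  | some v => rw [hv] at h; rw [← Option.some.inj h]

-- pvStepA on a '+++ b/' line sets the current file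
theorem pvStepA_file (fp : List Char) (st : Option (List Char) × Int) (a : List Char)
    (st2 : Option (List Char) × Int)
    (h1 : PySem.Chars.startswith a ['+','+','+',' ','b','/'] = true)
    (h : pvStepA fp st a = some st2) :
    st2 = (some (PySem.List.slice a (some 6) none), st.2) := by
  simp only [pvStepA, h1, if_true] at h
  exact (Option.some.inj h).symm

-- the current-file component of A's running state is the most recent '+++ b/' line
theorem pvRun_fst (fp : List Char) (Q : List (List Char)) :
    ∀ (st st' : Option (List Char) × Int), pvRun fp Q st = some st' →
      st'.1 = (pvLastFile Q.reverse).or st.1 := by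
  induction Q with
  | nil => intro st st' h; simp [pvRun] at h; subst h; simp [pvLastFile]
  | cons a l ih =>
    intro st st' h
    simp only [pvRun] at h
    rcases hst : pvStepA fp st a with _ | st2 <;> rw [hst] at h
    · exact absurd h (by simp)
    · have h2 := ih st2 st' h
      rw [List.reverse_cons, pvLastFile_append, h2]
      by_cases h1 : PySem.Chars.startswith a ['+','+','+',' ','b','/'] = true
      · rw [pvStepA_file fp st a st2 h1 hst]
        simp [pvLastFile, h1]
      · have hfst := pvStepA_fst fp st a st2 (by simpa using h1) hst
        have hla : pvLastFile [a] = none := by simp [pvLastFile, h1]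
        rw [hfst, hla, Option.or_none]

theorem pvPhase1_append (xs ys : List (List Char)) (i : Nat) (sb : Nat × Int) :
    pvPhase1 (xs ++ ys) i sb =
      match pvPhase1 xs i sb with
      | none => none
      | some sb' => pvPhase1 ys (i + xs.length) sb' := by
  induction xs generalizing i sb with
  | nil => simp [pvPhase1]
  | cons a l ih =>
    have e : i + 1 + l.length = i + (a :: l).length := by simp [List.length_cons]; omega
    simp only [List.cons_append, pvPhase1]
    split_ifs with h1 h2
    · cases hn : pvHunkNum? ((PySem.Chars.splitOn a [' '])[2]?.getD []) with
      | none => rfl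
      | some v => dsimp only; rw [ih, e]
    · rw [ih, e]
    · rw [ih, e]

theorem pvPhase1_bound (xs : List (List Char)) :
    ∀ (i : Nat) (sb sb' : Nat × Int), pvPhase1 xs i sb = some sb' → sb.1 ≤ i → sb'.1 ≤ i + xs.length := by
  induction xs with
  | nil => intro i sb sb' h hle; simp [pvPhase1] at h; subst h; simpa
  | cons a l ih =>
    intro i sb sb' h hle
    simp only [pvPhase1] at h
    split_ifs at h with h1 h2
    · cases hv : pvHunkNum? ((PySem.Chars.splitOn a [' '])[2]?.getD []) with
      | none => rw [hv] at h; exact absurd h (by simp)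
      | some v =>
        rw [hv] at h
        have := ih (i+1) (i+1, v-1) sb' h (by omega)
        simp only [List.length_cons]; omega
    · have := ih (i+1) sb sb' h (by omega); simp only [List.length_cons]; omega
    · have := ih (i+1) sb sb' h (by omega); simp only [List.length_cons]; omega

theorem pvCount_append (fp : List Char) (xs ys : List (List Char)) (st : Option (List Char) × Int) :
    pvCount fp (xs ++ ys) st = pvCount fp ys (pvCount fp xs st) := by
  induction xs generalizing st with
  | nil => simp [pvCount]
  | cons a l ih =>
    obtain ⟨cur, cnt⟩ := st
    simp only [List.cons_append, pvCount]
    split_ifs <;> exact ih _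

theorem pvPhase3_append (fp : List Char) (xs ys : List (List Char)) (st : Option (List Char) × Int × Bool) :
    pvPhase3 fp (xs ++ ys) st = pvPhase3 fp ys (pvPhase3 fp xs st) := by
  induction xs generalizing st with
  | nil => simp [pvPhase3]
  | cons a l ih =>
    obtain ⟨cur, cnt, fl⟩ := st
    simp only [List.cons_append, pvPhase3]
    split_ifs <;> exact ih _

-- phase 3's first two state components are the flagless counting pass
theorem pvPhase3_proj (fp : List Char) (xs : List (List Char)) :
    ∀ (cur : Option (List Char)) (cnt : Int) (fl : Bool),
      ((pvPhase3 fp xs (cur, cnt, fl)).1, (pvPhase3 fp xs (cur, cnt, fl)).2.1)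
        = pvCount fp xs (cur, cnt) := by
  induction xs with
  | nil => intro cur cnt fl; simp [pvPhase3, pvCount]
  | cons a l ih =>
    intro cur cnt fl
    by_cases h1 : PySem.Chars.startswith a ['+','+','+',' ','b','/'] = true
    · simp only [pvPhase3, pvCount, h1, if_true]; exact ih _ _ _
    · by_cases h2 : PySem.Chars.startswith a ['@','@'] = true
      · simp only [pvPhase3, pvCount, h1, h2, Bool.not_true, Bool.false_and,
          Bool.false_eq_true, if_false]
        exact ih _ _ _
      · by_cases h3 : (cur == some fp && (PySem.Chars.startswith a ['+'] ||
            PySem.Chars.startswith a [' '])) = true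
        · simp only [pvPhase3, pvCount, h1, h2, h3, Bool.not_false, Bool.true_and,
            Bool.false_eq_true, if_false, if_true]
          exact ih _ _ _
        · simp only [pvPhase3, pvCount, h1, h2, h3, Bool.not_false, Bool.true_and,
            Bool.false_eq_true, if_false]
          exact ih _ _ _

-- a '+++ b/' line does not start with '@@'
theorem pvNotBoth (x : List Char) (h : PySem.Chars.startswith x ['+','+','+',' ','b','/'] = true) :
    PySem.Chars.startswith x ['@','@'] = false := by
  rcases (PySem.Chars.startswith_iff x _).1 h with ⟨t, ht⟩
  by_contra hc
  rw [Bool.not_eq_false] at hc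
  rcases (PySem.Chars.startswith_iff x _).1 hc with ⟨t2, ht2⟩
  rw [← ht] at ht2
  simp at ht2

-- MAIN: A's exception-free run equals phase 1 / phase 2 / the flagless counting pass
theorem pvMain (fp : List Char) (P : List (List Char)) :
    pvRun fp P (none, 0) =
      match pvPhase1 P 0 (0, 0) with
      | none => none
      | some sb => some (pvCount fp (P.drop sb.1) (pvLastFile (P.take sb.1).reverse, sb.2)) := by
  induction P using List.reverseRecOn with
  | nil => simp [pvRun, pvPhase1, pvCount, pvLastFile]
  | append_singleton Q x ih =>
    rw [pvRun_append, pvPhase1_append]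
    cases hQ : pvRun fp Q (none, 0) with
    | none =>
      rw [hQ] at ih
      cases h1 : pvPhase1 Q 0 (0,0) with
      | none => rfl
      | some sb => rw [h1] at ih; exact absurd ih.symm (by simp)
    | some st =>
      rw [hQ] at ih
      cases h1 : pvPhase1 Q 0 (0,0) with
      | none => rw [h1] at ih; exact absurd ih (by simp)
      | some sb =>
        rw [h1] at ih
        obtain ⟨s, b⟩ := sb
        have hs : s ≤ Q.length := by
          have := pvPhase1_bound Q 0 (0,0) (s,b) h1 (by omega); simpa using this
        have hst : st = pvCount fp (Q.drop s) (pvLastFile (Q.take s).reverse, b) := by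
          simpa using ih
        have htake : (Q ++ [x]).take s = Q.take s := List.take_append_of_le_length hs
        have hdrop : (Q ++ [x]).drop s = Q.drop s ++ [x] := List.drop_append_of_le_length hs
        have hcf : st.1 = pvLastFile Q.reverse := by
          have := pvRun_fst fp Q (none, 0) st hQ; simpa using this
        have hkeep : pvCount fp ((Q ++ [x]).drop s) (pvLastFile ((Q ++ [x]).take s).reverse, b)
            = pvCount fp [x] st := by
          rw [htake, hdrop, pvCount_append, ← hst]
        dsimp only
        by_cases hx1 : PySem.Chars.startswith x ['+','+','+',' ','b','/'] = true
        · have hx2 : PySem.Chars.startswith x ['@','@'] = false := pvNotBoth x hx1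
          have hL : pvRun fp [x] st = some (some (PySem.List.slice x (some 6) none), st.2) := by
            simp [pvRun, pvStepA, hx1]
          have hR : pvPhase1 [x] (0 + Q.length) (s, b) = some (s, b) := by
            simp [pvPhase1, hx2]
          rw [hL, hR]
          dsimp only
          rw [hkeep]
          obtain ⟨cur, cnt⟩ := st
          simp [pvCount, hx1]
        · by_cases hx2 : PySem.Chars.startswith x ['@','@'] = true
          · -- hunk header line
            by_cases hv : (3 ≤ (PySem.Chars.splitOn x [' ']).length ∧
                PySem.Chars.startswith ((PySem.Chars.splitOn x [' '])[2]?.getD []) ['+'] = true)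
            · cases hn : pvHunkNum? ((PySem.Chars.splitOn x [' '])[2]?.getD []) with
              | none =>
                have hL : pvRun fp [x] st = none := by
                  simp [pvRun, pvStepA, hx1, hx2, hv.1, hv.2, hn]
                have hR : pvPhase1 [x] (0 + Q.length) (s, b) = none := by
                  simp [pvPhase1, hx2, hv.1, hv.2, hn]
                rw [hL, hR]
              | some v =>
                have hL : pvRun fp [x] st = some (st.1, v - 1) := by
                  simp [pvRun, pvStepA, hx1, hx2, hv.1, hv.2, hn]
                have hR : pvPhase1 [x] (0 + Q.length) (s, b) = some (Q.length + 1, v - 1) := by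
                  simp [pvPhase1, hx2, hv.1, hv.2, hn]
                rw [hL, hR]
                dsimp only
                have hdropall : (Q ++ [x]).drop (Q.length + 1) = [] := by simp
                have htakeall : (Q ++ [x]).take (Q.length + 1) = Q ++ [x] := by
                  rw [List.take_of_length_le (by simp)]
                simp only [hdropall, htakeall, pvCount, List.reverse_append,
                  List.reverse_cons, List.reverse_nil, List.nil_append, List.cons_append]
                have : pvLastFile (x :: Q.reverse) = pvLastFile Q.reverse := by
                  simp [pvLastFile, hx1]
                rw [this, ← hcf]
            · -- malformed header: both sides keep their state
              have hL : pvRun fp [x] st = some st := by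
                rcases Decidable.not_and_iff_not_or_not.1 hv with h3 | h3
                · simp [pvRun, pvStepA, hx1, hx2, h3]
                · have h3' : PySem.Chars.startswith ((PySem.Chars.splitOn x [' '])[2]?.getD [])
                      ['+'] = false := by simpa using h3
                  by_cases hlen : 3 ≤ (PySem.Chars.splitOn x [' ']).length <;>
                    simp [pvRun, pvStepA, hx1, hx2, hlen, h3']
              have hR : pvPhase1 [x] (0 + Q.length) (s, b) = some (s, b) := by
                rcases Decidable.not_and_iff_not_or_not.1 hv with h3 | h3
                · simp [pvPhase1, hx2, h3]
                · have h3' : PySem.Chars.startswith ((PySem.Chars.splitOn x [' '])[2]?.getD [])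
                      ['+'] = false := by simpa using h3
                  by_cases hlen : 3 ≤ (PySem.Chars.splitOn x [' ']).length <;>
                    simp [pvPhase1, hx2, hlen, h3']
              rw [hL, hR]
              dsimp only
              rw [hkeep]
              obtain ⟨cur, cnt⟩ := st
              simp [pvCount, hx1, hx2]
          · -- ordinary line: count or skip, same condition on both sides
            have hR : pvPhase1 [x] (0 + Q.length) (s, b) = some (s, b) := by
              simp [pvPhase1, hx2]
            have hx1' : PySem.Chars.startswith x ['+','+','+',' ','b','/'] = false := by simpa using hx1
            have hx2' : PySem.Chars.startswith x ['@','@'] = false := by simpa using hx2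
            rw [hR]
            dsimp only
            rw [hkeep]
            obtain ⟨cur, cnt⟩ := st
            by_cases hc : (cur == some fp && (PySem.Chars.startswith x ['+'] ||
                PySem.Chars.startswith x [' '])) = true <;>
              simp [pvRun, pvStepA, pvCount, hx1', hx2', hc]

-- head facts about startswith
theorem pvStarts_head (x : List Char) (c : Char) (cs : List Char)
    (h : PySem.Chars.startswith x (c :: cs) = true) : ∃ r, x = c :: r := by
  rcases (PySem.Chars.startswith_iff x _).1 h with ⟨t, ht⟩
  exact ⟨cs ++ t, by rw [← ht]; simp⟩

theorem pvStarts_cons_false (c d : Char) (r ds : List Char) (hne : d ≠ c) :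
    PySem.Chars.startswith (c :: r) (d :: ds) = false := by
  by_contra hc
  rw [Bool.not_eq_false] at hc
  obtain ⟨r2, he⟩ := pvStarts_head _ _ _ hc
  injection he with h1 _
  exact hne h1.symm

-- the last iteration of A's loop on the target line
theorem pvFinal (fp t : List Char) (last : Int) (cf : Option (List Char)) (n : Int)
    (hpm : (PySem.Chars.startswith t ['+'] || PySem.Chars.startswith t ['-']) = true) :
    pvLoopA fp last [t] last cf n =
      if (PySem.Chars.startswith t ['+'] &&
          (!PySem.Chars.startswith t ['+','+','+',' ','b','/'] && cf == some fp)) = true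
      then (n + 1, true) else (0, false) := by
  by_cases h1 : PySem.Chars.startswith t ['+','+','+',' ','b','/'] = true
  · simp [pvLoopA, h1]
  · by_cases h2 : PySem.Chars.startswith t ['@','@'] = true
    · obtain ⟨r, rfl⟩ := pvStarts_head t '@' _ h2
      have hplus : PySem.Chars.startswith ('@' :: r) ['+'] = false :=
        pvStarts_cons_false _ _ _ _ (by decide)
      cases hn : pvHunkNum? ((PySem.Chars.splitOn ('@' :: r) [' '])[2]?.getD []) <;>
        simp [pvLoopA, h1, h2, hplus, hn]
    · rcases Bool.or_eq_true_iff.1 hpm with hp | hm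
      · -- target starts with '+'
        obtain ⟨r, rfl⟩ := pvStarts_head t '+' _ hp
        have hsp : PySem.Chars.startswith ('+' :: r) [' '] = false :=
          pvStarts_cons_false _ _ _ _ (by decide)
        by_cases hcf : (cf == some fp) = true
        · simp [pvLoopA, h1, h2, hp, hsp, hcf]
        · simp [pvLoopA, h1, h2, hp, hsp, hcf]
      · -- target starts with '-': never counted, never returned
        obtain ⟨r, rfl⟩ := pvStarts_head t '-' _ hm
        have hsp : PySem.Chars.startswith ('-' :: r) [' '] = false :=
          pvStarts_cons_false _ _ _ _ (by decide)
        have hp : PySem.Chars.startswith ('-' :: r) ['+'] = false :=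
          pvStarts_cons_false _ _ _ _ (by decide)
        simp [pvLoopA, h1, h2, hp, hsp]

-- B's last phase-3 step on the target plus the flag check equals A's last iteration
theorem pvFinalB (fp t : List Char) (cf : Option (List Char)) (n : Int) (fl : Bool)
    (hpm : (PySem.Chars.startswith t ['+'] || PySem.Chars.startswith t ['-']) = true) :
    (if (pvPhase3 fp [t] (cf, n, fl)).2.2 then ((pvPhase3 fp [t] (cf, n, fl)).2.1, true)
      else (0, false)) =
      if (PySem.Chars.startswith t ['+'] &&
          (!PySem.Chars.startswith t ['+','+','+',' ','b','/'] && cf == some fp)) = true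
      then (n + 1, true) else (0, false) := by
  by_cases h1 : PySem.Chars.startswith t ['+','+','+',' ','b','/'] = true
  · simp [pvPhase3, h1]
  · by_cases h2 : PySem.Chars.startswith t ['@','@'] = true
    · obtain ⟨r, rfl⟩ := pvStarts_head t '@' _ h2
      have hplus : PySem.Chars.startswith ('@' :: r) ['+'] = false :=
        pvStarts_cons_false _ _ _ _ (by decide)
      simp [pvPhase3, h1, h2, hplus]
    · rcases Bool.or_eq_true_iff.1 hpm with hp | hm
      · by_cases hcf : (cf == some fp) = true
        · simp [pvPhase3, h1, h2, hp, hcf]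
        · simp [pvPhase3, h1, h2, hp, hcf]
      · obtain ⟨r, rfl⟩ := pvStarts_head t '-' _ hm
        have hsp : PySem.Chars.startswith ('-' :: r) [' '] = false :=
          pvStarts_cons_false _ _ _ _ (by decide)
        have hp : PySem.Chars.startswith ('-' :: r) ['+'] = false :=
          pvStarts_cons_false _ _ _ _ (by decide)
        simp [pvPhase3, h1, h2, hp, hsp]

-- ===== VERDICT (by name: the statement is the Claim_ definition above) =====
theorem extract_file_line_number_spec : Claim_equal_extract_file_line_number := by
  unfold Claim_equal_extract_file_line_number Spec_extract_file_line_number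
  intro numbered_line diff_text file_path _
  unfold extract_file_line_number extract_file_line_number_alt
  cases hN : PySem.Int.ofChars? numbered_line.toList with
  | none => rfl
  | some line_num =>
    dsimp only
    by_cases hg : 1 ≤ line_num ∧
        line_num ≤ ((PySem.Chars.splitOn diff_text.toList ['\n']).length : Int)
    · rw [if_pos hg]
      set lines := PySem.Chars.splitOn diff_text.toList ['\n'] with hlines
      have hlen : ¬ line_num > (lines.length : Int) := by omega
      rw [if_neg hlen]
      set k := (line_num - 1).toNat with hkdef
      have hklt : k < lines.length := by omega
      have hget : PySem.List.pyGet? lines (line_num - 1) = some (lines.getD k []) := by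
        have h1 : line_num - 1 = ((k : Nat) : Int) := by omega
        rw [h1]
        have hklt' : (k : Int) < (lines.length : Int) := by exact_mod_cast hklt
        simp [PySem.List.pyGet?, PySem.List.pyIdx?, List.getD, hklt',
          List.getElem?_eq_getElem hklt]
      rw [hget]
      dsimp only
      by_cases hpm : (PySem.Chars.startswith (lines.getD k []) ['+'] ||
          PySem.Chars.startswith (lines.getD k []) ['-']) = true
      · rw [if_pos hpm, if_pos hpm]
        have htake : lines.take line_num.toNat = lines.take k ++ [lines.getD k []] := by
          have h2 : line_num.toNat = k + 1 := by omega
          rw [h2, List.take_add_one]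
          simp [List.getElem?_eq_getElem hklt, List.getD]
        have hlast : (0 : Int) + ((lines.take k).length : Int) = line_num - 1 := by
          simp [List.length_take]
          omega
        rw [htake, pvLoopA_split file_path.toList (line_num - 1) (lines.take k)
          (lines.getD k []) 0 none 0 hlast, pvMain]
        cases hph : pvPhase1 (lines.take k) 0 (0, 0) with
        | none => rfl
        | some sb =>
          obtain ⟨s, b⟩ := sb
          dsimp only
          have hs : s ≤ (lines.take k).length := by
            have := pvPhase1_bound (lines.take k) 0 (0,0) (s,b) hph (by omega)
            simpa using this
          have hdrop : ((lines.take k ++ [lines.getD k []]).drop s)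
              = (lines.take k).drop s ++ [lines.getD k []] :=
            List.drop_append_of_le_length hs
          rw [hdrop, pvPhase3_append]
          have hproj := pvPhase3_proj file_path.toList ((lines.take k).drop s)
            (pvLastFile ((lines.take k).take s).reverse) b false
          rcases hq3 : pvPhase3 file_path.toList ((lines.take k).drop s)
            (pvLastFile ((lines.take k).take s).reverse, b, false) with ⟨qc, qn, qf⟩
          rw [hq3] at hproj
          rw [pvFinal _ _ _ _ _ hpm]
          have hqc : qc = (pvCount file_path.toList ((lines.take k).drop s)
              (pvLastFile ((lines.take k).take s).reverse, b)).1 := by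
            rw [← hproj]
          have hqn : qn = (pvCount file_path.toList ((lines.take k).drop s)
              (pvLastFile ((lines.take k).take s).reverse, b)).2 := by
            rw [← hproj]
          rw [← hqc, ← hqn]
          exact (pvFinalB file_path.toList (lines.getD k []) qc qn qf hpm).symm
      · rw [if_neg hpm, if_neg hpm]
    · rw [if_neg hg]
      by_cases hbig : line_num > ((PySem.Chars.splitOn diff_text.toList ['\n']).length : Int)
      · rw [if_pos hbig]
      · rw [if_neg hbig]
        have hle : line_num ≤ 0 := by omega
        cases hget : PySem.List.pyGet? (PySem.Chars.splitOn diff_text.toList ['\n'])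
            (line_num - 1) with
        | none => rfl
        | some target =>
          dsimp only
          by_cases hpm : (PySem.Chars.startswith target ['+'] ||
              PySem.Chars.startswith target ['-']) = true
          · rw [if_pos hpm]
            have h0 : line_num.toNat = 0 := by omega
            rw [h0]
            simp [pvLoopA]
          · rw [if_neg hpm]
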